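-- pv_equiv track=rewrite | github.com/LucasFQuirogaH/Python | Unsam Python/ejercicios_python/Clase11/hojas_ISO.py | hojas
-- ===== SOURCE A (Python) =====
-- def hojas(n):
--     if n == 0:
--         LargoEneMenos1 = 1189
--         AnchoEneMenos1 = 841
--     else:
--         LargoEne , AnchoEne = hojas(n - 1)
--         LargoEneMenos1 = AnchoEne
--         AnchoEneMenos1 = LargoEne // 2
--     return LargoEneMenos1 , AnchoEneMenos1
-- ===== SOURCE B (Python) =====
-- def hojas(n):
--     Largo, Ancho = 1189, 841
--     for _ in range(n):
--         Largo, Ancho = Ancho, Largo // 2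
--     return Largo, Ancho
-- ===== Notes on version B (the rewrite author's own statement) =====
-- stated objective: simpler
-- what changed: Replaces the recursive definition by an iterative loop that maintains the (Largo, Ancho) pair as an accumulator updated n times.
import Mathlib
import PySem

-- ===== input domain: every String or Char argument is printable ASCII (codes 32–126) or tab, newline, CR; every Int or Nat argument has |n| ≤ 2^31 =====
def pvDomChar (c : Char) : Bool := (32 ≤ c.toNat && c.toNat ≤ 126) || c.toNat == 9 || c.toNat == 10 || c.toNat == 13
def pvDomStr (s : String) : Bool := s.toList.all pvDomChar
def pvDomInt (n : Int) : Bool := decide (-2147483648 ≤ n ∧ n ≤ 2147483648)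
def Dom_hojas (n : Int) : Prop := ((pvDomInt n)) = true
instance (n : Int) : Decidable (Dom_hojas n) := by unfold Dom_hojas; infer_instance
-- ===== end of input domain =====

-- B replaces A's recursion by an iterative accumulator loop (objective: simpler; return value only).

-- ===== PORT A =====
-- Literal port of A's recursion; on n < 0 Python recurses forever (RecursionError),
-- which is outside Pre_hojas, so the port returns a dummy there.
def hojas (n : Int) : Int × Int :=
  if n = 0 then (1189, 841)
  else if h : 0 < n then
    let p := hojas (n - 1)
    (p.2, PySem.Int.floordiv p.1 2)
  else (0, 0)
termination_by n.toNat
decreasing_by omega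

-- ===== PORT B =====
def hojas_alt (n : Int) : Int × Int :=
  (PySem.List.pyRange 0 n 1).foldl
    (fun (p : Int × Int) _ => (p.2, PySem.Int.floordiv p.1 2)) (1189, 841)

-- ===== PRECONDITION & SPEC =====
-- Pre_ excludes negative n, on which A's recursion never reaches the base case (RecursionError).
def Pre_hojas (n : Int) : Prop := 0 ≤ n
instance (n : Int) : Decidable (Pre_hojas n) := by unfold Pre_hojas; infer_instance
def pvWitness_hojas : Int := 4

def Spec_hojas (n : Int) (out : Int × Int) : Prop := out = hojas_alt n
instance (n : Int) (out : Int × Int) : Decidable (Spec_hojas n out) := by unfold Spec_hojas; infer_instance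

-- ===== CLAIM (what is proved, stated in full; the proofs are below) =====
def Claim_equal_hojas : Prop := ∀ (n : Int), Dom_hojas n → Pre_hojas n → Spec_hojas n (hojas n)

-- ===== LEMMAS AND PROOFS =====
theorem hojas_alt_nat (k : Nat) :
    hojas_alt (k : Int) =
      (List.range k).foldl (fun (p : Int × Int) _ => (p.2, PySem.Int.floordiv p.1 2)) (1189, 841) := by
  unfold hojas_alt
  rw [PySem.List.pyRange_one, List.foldl_map]
  simp

theorem hojas_eq_alt_nat (k : Nat) : hojas (k : Int) = hojas_alt (k : Int) := by
  induction k with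
  | zero =>
    rw [hojas_alt_nat]
    simp [hojas]
  | succ m ih =>
    rw [hojas_alt_nat] at ih ⊢
    rw [List.range_succ, List.foldl_append]
    rw [hojas]
    have h0 : ((m : Int) + 1) ≠ 0 := by omega
    have h1 : (0 : Int) < (m : Int) + 1 := by omega
    push_cast
    simp only [h0, h1, if_false, dif_pos]
    have : ((m : Int) + 1 - 1) = (m : Int) := by omega
    rw [this, ih]
    simp

-- ===== VERDICT (by name: the statement is the Claim_ definition above) =====
theorem hojas_spec : Claim_equal_hojas := by
  intro n _ hpre
  unfold Spec_hojas
  obtain ⟨k, rfl⟩ := Int.eq_ofNat_of_zero_le hpre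
  exact hojas_eq_alt_nat k
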